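-- pv_equiv track=rewrite | github.com/rcybulski1122012/no_framework_app | app/core/http/router.py | _are_paths_matching
-- ===== SOURCE A (Python) =====
-- def _are_paths_matching(route, path):
--     route, path = route.split("/"), path.split("/")
--
--     if len(route) != len(path):
--         return False, None
--
--     kwargs = {}
--
--     for route_part, path_part in zip(route, path):
--         if route_part == path_part:
--             continue
--         else:
--             if _is_variable(route_part):
--                 kwargs[_get_variable_name(route_part)] = path_part
--             else:
--                 return False, None
--     return True, kwargs
--
-- def _is_variable(part):
--     return part[0] == "<" and part[-1] == ">"
--
-- def _get_variable_name(part):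
--     return part[1:-1]
-- ===== SOURCE B (Python) =====
-- def _are_paths_matching(route, path):
--     # Two-pointer scan over the raw strings: peel one "/"-separated segment from each
--     # per iteration; no split, no length pre-check, no zip -- a length mismatch is
--     # detected when exactly one side runs out of separators.
--     kwargs = {}
--     while True:
--         k = route.find("/")
--         l = path.find("/")
--         r = route if k < 0 else route[:k]
--         p = path if l < 0 else path[:l]
--         if r != p:
--             if r.startswith("<") and r.endswith(">"):
--                 kwargs[r[1:-1]] = p
--             else:
--                 return False, None
--         if (k < 0) != (l < 0):
--             return False, None
--         if k < 0:
--             return True, kwargs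
--         route = route[k + 1:]
--         path = path[l + 1:]
-- ===== Notes on version B (the rewrite author's own statement) =====
-- stated objective: alternative
-- what changed: A splits both strings into segment lists, compares their lengths, then zip-scans them building kwargs; B never splits or counts: it runs a two-pointer loop over the raw strings, peeling one '/'-separated segment from each per iteration with find/slicing, detecting a length mismatch when exactly one side runs out of separators, and uses a total startswith/endswith variable test.
-- outside the precondition, e.g. on _are_paths_matching('a//x', 'b/c/x'): A returns (False, None), B returns (False, None)
import Mathlib
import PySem

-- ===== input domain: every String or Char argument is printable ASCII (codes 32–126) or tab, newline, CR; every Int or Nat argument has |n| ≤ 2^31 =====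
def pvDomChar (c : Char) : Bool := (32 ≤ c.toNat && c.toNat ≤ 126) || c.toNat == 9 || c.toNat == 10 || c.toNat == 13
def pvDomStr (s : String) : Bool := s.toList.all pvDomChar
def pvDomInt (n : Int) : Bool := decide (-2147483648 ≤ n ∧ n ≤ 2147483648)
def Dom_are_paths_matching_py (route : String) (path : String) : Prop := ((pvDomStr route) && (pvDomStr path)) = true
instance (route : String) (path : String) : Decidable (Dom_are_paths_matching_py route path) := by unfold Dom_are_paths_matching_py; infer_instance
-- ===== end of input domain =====

-- B replaces A's split + length check + zip loop by a two-pointer scan over the raw strings,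
-- peeling one "/"-separated segment from each per iteration; equal return values, no speed claim.

-- ===== PORT A =====
-- _is_variable: part[0] == "<" and part[-1] == ">" ; Python raises IndexError on part = ""
-- (excluded by Pre_); here pyGet? returns none there, so the == tests are false.
def pyIsVariable (part : String) : Bool :=
  (PySem.Str.pyGet? part 0 == some '<') && (PySem.Str.pyGet? part (-1) == some '>')

-- _get_variable_name: part[1:-1]
def pyGetVariableName (part : String) : String :=
  PySem.Str.slice part (some 1) (some (-1))

-- the for-loop over zip(route, path) with its early return and the kwargs dict
def pyMatchLoop : List (String × String) → PySem.Dict String String → Bool × (Option (List (String × String)))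
  | [], kwargs => (true, some kwargs.items)
  | (route_part, path_part) :: rest, kwargs =>
    if route_part == path_part then pyMatchLoop rest kwargs
    else if pyIsVariable route_part then
      pyMatchLoop rest (kwargs.insert (pyGetVariableName route_part) path_part)
    else (false, none)

def are_paths_matching_py (route : String) (path : String) : Bool × (Option (List (String × String))) :=
  let routeParts := (PySem.Str.split? route "/").getD []
  let pathParts := (PySem.Str.split? path "/").getD []
  if routeParts.length ≠ pathParts.length then (false, none)
  else pyMatchLoop (routeParts.zip pathParts) PySem.Dict.empty

-- ===== PORT B =====
-- B's variable test: part.startswith("<") and part.endswith(">") (total, no indexing)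
def altIsVariable (part : String) : Bool :=
  PySem.Str.startswith part "<" && PySem.Str.endswith part ">"

-- Source B's while loop over the two remaining strings. Per iteration Source B computes
-- k = route.find("/") and the segment r = route (k == -1) or route[:k], then continues with
-- route[k+1:]; on the remaining characters these are exactly takeWhile (· ≠ '/'),
-- dropWhile (· ≠ '/') = [] iff k == -1, and (dropWhile …).tail — ported as such (exact).
def altGo : List Char → List Char → PySem.Dict String String → Bool × (Option (List (String × String)))
  | rc, pc, kwargs =>
    let r := String.ofList (rc.takeWhile (· ≠ '/'))
    let p := String.ofList (pc.takeWhile (· ≠ '/'))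
    if r ≠ p ∧ altIsVariable r = false then (false, none)
    else
      let kwargs' := if r ≠ p then kwargs.insert (PySem.Str.slice r (some 1) (some (-1))) p else kwargs
      match hr : rc.dropWhile (· ≠ '/'), pc.dropWhile (· ≠ '/') with
      | [], [] => (true, some kwargs'.items)
      | [], _ :: _ => (false, none)
      | _ :: _, [] => (false, none)
      | _ :: rt, _ :: pt => altGo rt pt kwargs'
termination_by rc _ _ => rc.length
decreasing_by
  have h1 : (rc.dropWhile (· ≠ '/')).length ≤ rc.length := List.length_dropWhile_le _ _
  rw [hr] at h1; simp at h1; omega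

def are_paths_matching_py_alt (route : String) (path : String) : Bool × (Option (List (String × String))) :=
  altGo route.toList path.toList PySem.Dict.empty

-- ===== PRECONDITION & SPEC =====
-- Python A raises IndexError when _is_variable hits an empty route segment (part[0] on "").
-- Pre_ excludes every equal-length input whose zipped segments contain an empty route
-- segment unequal to its path segment; this is slightly wider than the exact raise set
-- (a non-variable mismatch earlier in the loop makes A return (False, None) first; B
-- returns (False, None) there too — see the cite in claim.json).
def Pre_are_paths_matching_py (route : String) (path : String) : Prop :=
  let rs := (PySem.Str.split? route "/").getD []
  let ps := (PySem.Str.split? path "/").getD []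
  rs.length = ps.length → ∀ pr ∈ rs.zip ps, pr.1 = "" → pr.1 = pr.2
instance (route : String) (path : String) : Decidable (Pre_are_paths_matching_py route path) := by
  unfold Pre_are_paths_matching_py; infer_instance

def pvWitness_are_paths_matching_py : String × String := ("users/<id>/posts", "users/7/posts")

def Spec_are_paths_matching_py (route : String) (path : String) (out : Bool × (Option (List (String × String)))) : Prop := out = are_paths_matching_py_alt route path
instance (route : String) (path : String) (out : Bool × (Option (List (String × String)))) : Decidable (Spec_are_paths_matching_py route path out) := by unfold Spec_are_paths_matching_py; infer_instance

-- ===== CLAIM (what is proved, stated in full; the proofs are below) =====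
def Claim_equal_are_paths_matching_py : Prop := ∀ (route : String) (path : String), Dom_are_paths_matching_py route path → Pre_are_paths_matching_py route path → Spec_are_paths_matching_py route path (are_paths_matching_py route path)


-- ===== LEMMAS AND PROOFS =====

-- the segment list "/".split produces, in structural form
def segs : List Char → List (List Char)
  | [] => [[]]
  | c :: rest => if c = '/' then [] :: segs rest else (segs rest).modifyHead (c :: ·)

lemma segs_ne_nil (l : List Char) : segs l ≠ [] := by
  induction l with
  | nil => simp [segs]
  | cons c rest ih =>
    simp only [segs]
    split
    · simp
    · cases h : segs rest with
      | nil => exact absurd h ih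
      | cons a t => simp [List.modifyHead]

-- segs in the span form B's loop peels segments in
lemma segs_span (l : List Char) :
    segs l = match l.dropWhile (· ≠ '/') with
      | [] => [l.takeWhile (· ≠ '/')]
      | _ :: t => l.takeWhile (· ≠ '/') :: segs t := by
  induction l with
  | nil => simp [segs]
  | cons c rest ih =>
    by_cases hc : c = '/'
    · subst hc; simp [segs, List.dropWhile, List.takeWhile]
    · simp only [segs, List.dropWhile_cons, List.takeWhile_cons,
        hc, ne_eq, not_false_eq_true, decide_true]
      rw [ih]
      cases h : rest.dropWhile (· ≠ '/') with
      | nil => simp [List.modifyHead, hc]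
      | cons d t => simp [List.modifyHead, hc]

lemma go_eq (fuel : Nat) (l cur : List Char) (acc : List (List Char)) (h : l.length < fuel) :
    PySem.Chars.splitOn.go ['/'] fuel l cur acc = acc.reverse ++ (segs l).modifyHead (cur.reverse ++ ·) := by
  induction fuel generalizing l cur acc with
  | zero => omega
  | succ f ih =>
    cases l with
    | nil => simp [PySem.Chars.splitOn.go, segs]
    | cons c rest =>
      rw [PySem.Chars.splitOn.go]
      by_cases hc : c = '/'
      · subst hc
        rw [if_pos (by simp [List.isPrefixOf])]
        rw [ih _ _ _ (by simp at h ⊢; omega)]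
        cases hs : segs rest with
        | nil => exact absurd hs (segs_ne_nil rest)
        | cons a t => simp [segs, hs, List.modifyHead]
      · rw [if_neg (by simp [List.isPrefixOf]; exact fun hh => (hc hh.symm).elim)]
        rw [ih _ _ _ (by simp at h ⊢; omega)]
        cases hs : segs rest with
        | nil => exact absurd hs (segs_ne_nil rest)
        | cons a t => simp [segs, hc, hs, List.modifyHead]

lemma splitOn_eq (l : List Char) : PySem.Chars.splitOn l ['/'] = segs l := by
  rw [PySem.Chars.splitOn, go_eq _ _ _ _ (Nat.lt_succ_self _)]
  cases hs : segs l with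
  | nil => exact absurd hs (segs_ne_nil l)
  | cons a t => simp [List.modifyHead]

-- a one-element list is a suffix exactly when it is the last element
lemma suffix_singleton_iff (c : Char) (cs : List Char) :
    ['>'] <:+ (c :: cs) ↔ (c :: cs)[cs.length]'(by simp) = '>' := by
  constructor
  · rintro ⟨t, ht⟩
    have hlen := congrArg List.length ht
    simp at hlen
    have := congrArg (fun l => l[cs.length]?) ht
    simp [hlen] at this
    simp [← this]
  · intro h
    refine ⟨(c :: cs).take cs.length, ?_⟩
    have hdrop : (c :: cs).drop cs.length = [(c :: cs)[cs.length]'(by simp)] := by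
      rw [List.drop_eq_getElem_cons (by simp)]
      simp
    rw [h] at hdrop
    rw [← hdrop, List.take_append_drop]

-- A's indexing test and B's startswith/endswith test agree on every string
lemma isVariable_eq (part : String) : pyIsVariable part = altIsVariable part := by
  simp only [pyIsVariable, altIsVariable, PySem.Str.pyGet?_eq, PySem.Chars.pyGet?_eq_listPyGet?,
    PySem.Str.startswith_eq, PySem.Str.endswith_eq, String.reduceToList]
  cases h : part.toList with
  | nil => decide
  | cons c cs =>
    simp only [PySem.List.pyGet?, PySem.List.pyIdx?, PySem.Chars.startswith, PySem.Chars.endswith,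
      List.isPrefixOf, Bool.and_true]
    by_cases hlast : (c :: cs)[cs.length]'(by simp) = '>'
    · have hs : ['>'].isSuffixOf (c :: cs) = true := by
        rw [List.isSuffixOf_iff_suffix]; exact (suffix_singleton_iff c cs).mpr hlast
      simp [hlast, hs, eq_comm]
    · have hs : ['>'].isSuffixOf (c :: cs) = false := by
        rw [Bool.eq_false_iff, ne_eq, List.isSuffixOf_iff_suffix]
        exact fun h => hlast ((suffix_singleton_iff c cs).mp h)
      simp [hlast, hs, beq_iff_eq]

-- B's two-pointer scan equals "compare segment counts, then run A's loop on the zipped segments"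
lemma altGo_eq (rc pc : List Char) (d : PySem.Dict String String) :
    altGo rc pc d =
      if (segs rc).length ≠ (segs pc).length then (false, none)
      else pyMatchLoop (((segs rc).map String.ofList).zip ((segs pc).map String.ofList)) d := by
  rw [altGo, segs_span rc, segs_span pc]
  set R := rc.takeWhile (· ≠ '/') with hR
  set P := pc.takeWhile (· ≠ '/') with hP
  by_cases hrp : String.ofList R = String.ofList P
  all_goals
    cases hr : rc.dropWhile (· ≠ '/') with
    | nil =>
      cases hp : pc.dropWhile (· ≠ '/') with
      | nil =>
        by_cases hv : altIsVariable (String.ofList R) = true <;>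
          simp [pyMatchLoop, hrp, isVariable_eq, hv, pyGetVariableName]
      | cons b pt =>
        by_cases hv : altIsVariable (String.ofList R) = true <;>
          · have hne : (segs pt).length ≠ 0 := by
              simpa using segs_ne_nil pt
            simp [pyMatchLoop, hrp, isVariable_eq, hv, hne]
            try omega
    | cons a rt =>
      cases hp : pc.dropWhile (· ≠ '/') with
      | nil =>
        by_cases hv : altIsVariable (String.ofList R) = true <;>
          · have hne : (segs rt).length ≠ 0 := by
              simpa using segs_ne_nil rt
            simp [pyMatchLoop, hrp, isVariable_eq, hv, hne]
            try omega
      | cons b pt =>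
        by_cases hv : altIsVariable (String.ofList R) = true <;>
          simp [pyMatchLoop, hrp, isVariable_eq, hv, pyGetVariableName,
            altGo_eq rt pt]
termination_by rc.length
decreasing_by
  all_goals
    have h1 : (rc.dropWhile (· ≠ '/')).length ≤ rc.length := List.length_dropWhile_le _ _
    rw [hr] at h1; simp at h1; omega

-- ===== VERDICT (by name: the statements are the Claim_ definitions above) =====
theorem are_paths_matching_py_spec : Claim_equal_are_paths_matching_py := by
  intro route path _hdom _hpre
  unfold Spec_are_paths_matching_py are_paths_matching_py are_paths_matching_py_alt
  rw [altGo_eq]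
  have hsr : (PySem.Str.split? route "/").getD [] = (segs route.toList).map String.ofList := by
    simp [PySem.Str.split?, PySem.Chars.split?, splitOn_eq]
  have hsp : (PySem.Str.split? path "/").getD [] = (segs path.toList).map String.ofList := by
    simp [PySem.Str.split?, PySem.Chars.split?, splitOn_eq]
  rw [hsr, hsp]
  simp
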